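-- pv_equiv track=rewrite | github.com/readalong/omni-doc | src/omni_doc/nodes/repo_scanner.py | _find_source_files
-- ===== SOURCE A (Python) =====
-- import fnmatch
--
-- EXCLUDE_PATTERNS = [
--     "node_modules/*",
--     ".git/*",
--     "__pycache__/*",
--     "*.pyc",
--     ".venv/*",
--     "venv/*",
--     "dist/*",
--     "build/*",
--     ".tox/*",
--     ".pytest_cache/*",
--     "*.egg-info/*",
--     "poetry.lock",
--     "package-lock.json",
--     "yarn.lock",
-- ]
--
-- SOURCE_CODE_EXTENSIONS = [
--     ".py", ".js", ".ts", ".jsx", ".tsx",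
--     ".java", ".kt", ".scala",
--     ".go", ".rs", ".c", ".cpp", ".h", ".hpp",
--     ".rb", ".php", ".cs", ".swift",
--     ".sh", ".bash", ".zsh",
-- ]
--
-- def _matches_any_pattern(path: str, patterns: list[str]) -> bool:
--     """Check if path matches any of the given patterns.
--
--     Args:
--         path: File path
--         patterns: List of glob patterns
--
--     Returns:
--         True if path matches any pattern
--     """
--     for pattern in patterns:
--         if fnmatch.fnmatch(path.lower(), pattern.lower()):
--             return True
--         # Also check if pattern is in the path (for directory patterns)
--         if pattern.endswith("/*") and pattern[:-2].lower() in path.lower():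
--             return True
--     return False
--
-- def _find_source_files(all_files: list[str]) -> list[str]:
--     """Find source code files for comprehensive documentation analysis.
--
--     Prioritizes main entry points and important files.
--
--     Args:
--         all_files: List of all file paths in repo
--
--     Returns:
--         List of source file paths, sorted by importance
--     """
--     source_files = []
--     priority_files = []  # Files that should come first
--
--     for file_path in all_files:
--         # Skip excluded patterns
--         if _matches_any_pattern(file_path, EXCLUDE_PATTERNS):
--             continue
--
--         # Skip test files
--         lower_path = file_path.lower()
--         if any(skip in lower_path for skip in ["test", "spec", "__pycache__", ".git"]):
--             continue
--
--         # Check if it's a source code file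
--         if _is_source_code_file(file_path):
--             # Prioritize certain files
--             filename = file_path.split("/")[-1].lower()
--             if filename in ["main.py", "app.py", "index.js", "index.ts", "main.go", "main.rs", "main.java"]:
--                 priority_files.append(file_path)
--             elif filename.startswith("__init__") or filename == "mod.rs":
--                 priority_files.append(file_path)
--             else:
--                 source_files.append(file_path)
--
--     # Return priority files first, then others
--     return priority_files + source_files
--
-- def _is_source_code_file(path: str) -> bool:
--     """Check if a file path is a source code file.
--
--     Args:
--         path: File path
--
--     Returns:
--         True if file appears to be source code
--     """
--     lower_path = path.lower()
--
--     for ext in SOURCE_CODE_EXTENSIONS: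
--         if lower_path.endswith(ext):
--             return True
--
--     return False
-- ===== SOURCE B (Python) =====
-- import re
--
-- EXCLUDE_PATTERNS = [
--     "node_modules/*",
--     ".git/*",
--     "__pycache__/*",
--     "*.pyc",
--     ".venv/*",
--     "venv/*",
--     "dist/*",
--     "build/*",
--     ".tox/*",
--     ".pytest_cache/*",
--     "*.egg-info/*",
--     "poetry.lock",
--     "package-lock.json",
--     "yarn.lock",
-- ]
--
-- SOURCE_CODE_EXTENSIONS = [
--     ".py", ".js", ".ts", ".jsx", ".tsx",
--     ".java", ".kt", ".scala",
--     ".go", ".rs", ".c", ".cpp", ".h", ".hpp",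
--     ".rb", ".php", ".cs", ".swift",
--     ".sh", ".bash", ".zsh",
-- ]
--
-- SKIP_TOKENS = ["test", "spec", "__pycache__", ".git"]
--
-- # what fnmatch does to a '*' glob: escape the literal parts, join them with '.*'
-- _EXCLUDE_REGEXES = [
--     re.compile(".*".join(re.escape(part) for part in pat.split("*")), re.DOTALL)
--     for pat in EXCLUDE_PATTERNS
-- ]
--
-- PRIORITY_NAMES = [
--     "main.py", "app.py", "index.js", "index.ts",
--     "main.go", "main.rs", "main.java", "mod.rs",
-- ]
--
--
-- def _wanted(path):
--     """A path is wanted iff it has a source-code extension, contains no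
--     skip token, and is excluded by no pattern (glob match, or substring of
--     the directory part for 'dir/*' patterns)."""
--     lp = path.lower()
--     if not any(lp.endswith(ext) for ext in SOURCE_CODE_EXTENSIONS):
--         return False
--     if any(tok in lp for tok in SKIP_TOKENS):
--         return False
--     return not any(
--         (pat.endswith("/*") and pat[:-2] in lp) or rx.fullmatch(lp)
--         for pat, rx in zip(EXCLUDE_PATTERNS, _EXCLUDE_REGEXES)
--     )
--
--
-- def _rank(path):
--     name = path.split("/")[-1].lower()
--     return 0 if name in PRIORITY_NAMES or name.startswith("__init__") else 1
--
--
-- def _find_source_files(all_files):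
--     return sorted((p for p in all_files if _wanted(p)), key=_rank)
-- ===== Notes on version B (the rewrite author's own statement) =====
-- stated objective: idiomatic
-- what changed: B replaces A's two-accumulator partition loop (priority_files/source_files built separately and concatenated) by one filtered pass over the once-lowered path plus a stable sort on a two-valued priority key, with the exclusion globs precompiled into regexes once instead of run through fnmatch (with re-lowering) per file and pattern.
import Mathlib
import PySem

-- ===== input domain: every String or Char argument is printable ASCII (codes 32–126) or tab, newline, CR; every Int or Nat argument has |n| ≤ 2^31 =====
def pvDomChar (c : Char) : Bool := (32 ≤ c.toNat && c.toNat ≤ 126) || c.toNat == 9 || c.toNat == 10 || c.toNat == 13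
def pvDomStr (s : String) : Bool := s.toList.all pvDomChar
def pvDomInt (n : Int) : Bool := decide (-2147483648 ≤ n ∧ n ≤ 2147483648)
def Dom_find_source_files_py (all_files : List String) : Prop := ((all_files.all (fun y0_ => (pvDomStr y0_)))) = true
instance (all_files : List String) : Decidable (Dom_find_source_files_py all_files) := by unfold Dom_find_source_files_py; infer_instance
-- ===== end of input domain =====

-- B replaces A's two-accumulator partition loop by one filtered pass followed by a
-- stable sort on a two-valued priority key, patterns precompiled once (objective: idiomatic).

-- ===== PORT A =====

-- module constants
def pvExcludePatterns : List String :=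
  ["node_modules/*", ".git/*", "__pycache__/*", "*.pyc", ".venv/*", "venv/*",
   "dist/*", "build/*", ".tox/*", ".pytest_cache/*", "*.egg-info/*",
   "poetry.lock", "package-lock.json", "yarn.lock"]

def pvSourceExts : List String :=
  [".py", ".js", ".ts", ".jsx", ".tsx", ".java", ".kt", ".scala",
   ".go", ".rs", ".c", ".cpp", ".h", ".hpp", ".rb", ".php", ".cs", ".swift",
   ".sh", ".bash", ".zsh"]

def pvSkipWords : List String := ["test", "spec", "__pycache__", ".git"]

def pvMainEntryNames : List String :=
  ["main.py", "app.py", "index.js", "index.ts", "main.go", "main.rs", "main.java"]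

-- fnmatch.fnmatch(name, pat) / re.fullmatch(".*".join(map(re.escape, pat.split("*"))), name, re.DOTALL):
-- exact for patterns whose only regex/glob metacharacter is '*' (true of every pattern in
-- pvExcludePatterns: no '?', '[' occur; POSIX normcase is the identity; DOTALL lets '.*'
-- cross newlines, as '*' does in fnmatch). pat.split("*") never returns [].
def pvStarParts (pat : String) : List (List Char) :=
  ((PySem.Str.split? pat "*").getD []).map String.toList

-- pvSegsMatch parts s: s matches the regex ".*p1.*p2...*pk" (existence of a decomposition,
-- found by backtracking)
def pvSegsMatch : List (List Char) → List Char → Bool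
  | [], s => s.isEmpty
  | p :: ps, [] => p.isPrefixOf [] && pvSegsMatch ps []
  | p :: ps, c :: t =>
      (p.isPrefixOf (c :: t) && pvSegsMatch ps ((c :: t).drop p.length)) ||
      pvSegsMatch (p :: ps) t
termination_by parts s => parts.length + s.length
decreasing_by all_goals (simp [List.length_drop] <;> omega)

-- fullmatch of "p1.*p2...*pk"
def pvFullmatchStar (parts : List (List Char)) (s : List Char) : Bool :=
  match parts with
  | [] => s.isEmpty
  | p :: ps => p.isPrefixOf s && pvSegsMatch ps (s.drop p.length)

def pvFnmatch (name pat : String) : Bool := pvFullmatchStar (pvStarParts pat) name.toList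

-- _matches_any_pattern (the for/early-return is the List.any)
def pvMatchesAnyPattern (path : String) (patterns : List String) : Bool :=
  patterns.any (fun pattern =>
    pvFnmatch (PySem.Str.lower path) (PySem.Str.lower pattern) ||
    (PySem.Str.endswith pattern "/*" &&
      PySem.Str.isIn (PySem.Str.lower (PySem.Str.slice pattern none (some (-2))))
        (PySem.Str.lower path)))

-- _is_source_code_file
def pvIsSourceCodeFile (path : String) : Bool :=
  pvSourceExts.any (fun ext => PySem.Str.endswith (PySem.Str.lower path) ext)

-- file_path.split("/")[-1].lower()  ("/" ≠ "" so split? is always some; the split is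
-- never empty so the [-1] never raises and pyGetD's default is unreachable)
def pvBasenameLower (path : String) : String :=
  PySem.Str.lower (PySem.List.pyGetD ((PySem.Str.split? path "/").getD []) (-1) "")

def pvStepA (acc : List String × List String) (file_path : String) :
    List String × List String :=
  let (source_files, priority_files) := acc
  if pvMatchesAnyPattern file_path pvExcludePatterns then acc
  else
    let lower_path := PySem.Str.lower file_path
    if pvSkipWords.any (fun skip => PySem.Str.isIn skip lower_path) then acc
    else if pvIsSourceCodeFile file_path then
      let filename := pvBasenameLower file_path
      if pvMainEntryNames.contains filename then
        (source_files, priority_files ++ [file_path])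
      else if PySem.Str.startswith filename "__init__" || filename == "mod.rs" then
        (source_files, priority_files ++ [file_path])
      else (source_files ++ [file_path], priority_files)
    else acc

def find_source_files_py (all_files : List String) : List String :=
  let res := all_files.foldl pvStepA ([], [])
  res.2 ++ res.1

-- ===== PORT B =====

def pvSkipTokens : List String := ["test", "spec", "__pycache__", ".git"]

def pvPriorityNames : List String :=
  ["main.py", "app.py", "index.js", "index.ts", "main.go", "main.rs", "main.java",
   "mod.rs"]

-- _wanted: extension check, then skip tokens, then exclusion patterns, all on the
-- once-lowered path (the patterns are lowercase literals, so fnmatch gets them as is)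
def pvWanted (path : String) : Bool :=
  let lp := PySem.Str.lower path
  if !(pvSourceExts.any (fun ext => PySem.Str.endswith lp ext)) then false
  else if pvSkipTokens.any (fun tok => PySem.Str.isIn tok lp) then false
  else !(pvExcludePatterns.any (fun pat =>
    (PySem.Str.endswith pat "/*" &&
      PySem.Str.isIn (PySem.Str.slice pat none (some (-2))) lp) ||
    pvFullmatchStar (pvStarParts pat) lp.toList))

-- _rank
def pvRank (path : String) : Int :=
  let name := PySem.Str.lower (PySem.List.pyGetD ((PySem.Str.split? path "/").getD []) (-1) "")
  if pvPriorityNames.contains name || PySem.Str.startswith name "__init__" then 0 else 1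

def find_source_files_py_alt (all_files : List String) : List String :=
  PySem.List.sorted (all_files.filter pvWanted) pvRank false

-- ===== PRECONDITION & SPEC =====
def Spec_find_source_files_py (all_files : List String) (out : List String) : Prop := out = find_source_files_py_alt all_files
instance (all_files : List String) (out : List String) : Decidable (Spec_find_source_files_py all_files out) := by unfold Spec_find_source_files_py; infer_instance

-- ===== CLAIM (what is proved, stated in full; the proofs are below) =====
def Claim_equal_find_source_files_py : Prop := ∀ (all_files : List String), Dom_find_source_files_py all_files → Spec_find_source_files_py all_files (find_source_files_py all_files)

-- ===== LEMMAS AND PROOFS =====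

-- the two-valued key
theorem pvRank_cases (f : String) : pvRank f = 0 ∨ pvRank f = 1 := by
  unfold pvRank; dsimp only; split <;> simp

-- A's matcher equals B's any over a list of patterns that are fixed by lowercasing
theorem pvMatch_congr (f : String) (pats : List String)
    (h : pats.all (fun p =>
        (PySem.Str.lower p == p) &&
        (PySem.Str.lower (PySem.Str.slice p none (some (-2))) ==
          PySem.Str.slice p none (some (-2)))) = true) :
    pvMatchesAnyPattern f pats =
      pats.any (fun pat =>
        (PySem.Str.endswith pat "/*" &&
          PySem.Str.isIn (PySem.Str.slice pat none (some (-2))) (PySem.Str.lower f)) ||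
        pvFullmatchStar (pvStarParts pat) (PySem.Str.lower f).toList) := by
  induction pats with
  | nil => rfl
  | cons p ps ih =>
    simp only [List.all_cons, Bool.and_eq_true, beq_iff_eq] at h
    obtain ⟨⟨hp, hs⟩, hrest⟩ := h
    unfold pvMatchesAnyPattern at ih ⊢
    simp only [List.any_cons, hp, hs, ih hrest]
    rw [Bool.or_comm (pvFnmatch (PySem.Str.lower f) p)]
    rfl

theorem pvMatch_eq (f : String) :
    pvMatchesAnyPattern f pvExcludePatterns =
      pvExcludePatterns.any (fun pat =>
        (PySem.Str.endswith pat "/*" &&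
          PySem.Str.isIn (PySem.Str.slice pat none (some (-2))) (PySem.Str.lower f)) ||
        pvFullmatchStar (pvStarParts pat) (PySem.Str.lower f).toList) :=
  pvMatch_congr f pvExcludePatterns (by decide)

-- A's priority condition over the basename equals B's merged-list condition
theorem pvRank_names (s : String) :
    (pvMainEntryNames.contains s || PySem.Str.startswith s "__init__" || s == "mod.rs")
      = (pvPriorityNames.contains s || PySem.Str.startswith s "__init__") := by
  rw [Bool.eq_iff_iff]
  simp only [pvMainEntryNames, pvPriorityNames, List.contains_eq_mem, List.mem_cons,
    List.not_mem_nil, or_false, Bool.or_eq_true, decide_eq_true_eq, beq_iff_eq]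
  tauto

-- B's keep predicate in A's three-test form
theorem pvWanted_eq (f : String) :
    pvWanted f =
      (!pvMatchesAnyPattern f pvExcludePatterns &&
       !(pvSkipWords.any (fun skip => PySem.Str.isIn skip (PySem.Str.lower f))) &&
       pvIsSourceCodeFile f) := by
  rw [show pvSkipWords = pvSkipTokens from rfl]
  simp only [pvWanted, pvIsSourceCodeFile]
  rw [pvMatch_eq]
  cases hE : (pvSourceExts.any fun ext => PySem.Str.endswith (PySem.Str.lower f) ext) <;>
  cases hS : (pvSkipTokens.any fun tok => PySem.Str.isIn tok (PySem.Str.lower f)) <;>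
  cases hM : (pvExcludePatterns.any fun pat =>
      (PySem.Str.endswith pat "/*" &&
        PySem.Str.isIn (PySem.Str.slice pat none (some (-2))) (PySem.Str.lower f)) ||
      pvFullmatchStar (pvStarParts pat) (PySem.Str.lower f).toList) <;>
    rfl

-- pvRank in A's three-disjunct form over the basename
theorem pvRank_eq (f : String) :
    pvRank f =
      (if (pvMainEntryNames.contains (pvBasenameLower f) ||
           PySem.Str.startswith (pvBasenameLower f) "__init__" ||
           pvBasenameLower f == "mod.rs") then (0 : Int) else 1) := by
  unfold pvRank pvBasenameLower
  dsimp only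
  simp only [pvRank_names]

-- the branch arithmetic of the two priority tests vs the two-valued rank
theorem pvBranches (a b c : Bool) (X Y : List String × List String) :
    (if a = true then X else if (b || c) = true then X else Y)
      = (if (if (a || b || c) = true then (0 : Int) else 1) = 0 then X else Y) := by
  cases a <;> cases b <;> cases c <;> simp

-- A's step rewritten through B's helpers
set_option maxHeartbeats 1000000 in
theorem pvStepA_eq (acc : List String × List String) (f : String) :
    pvStepA acc f =
      if pvWanted f then
        (if pvRank f = 0 then (acc.1, acc.2 ++ [f]) else (acc.1 ++ [f], acc.2))
      else acc := by
  obtain ⟨s, p⟩ := acc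
  rw [pvWanted_eq]
  unfold pvStepA
  dsimp only
  by_cases h1 : pvMatchesAnyPattern f pvExcludePatterns <;>
    simp only [h1, Bool.not_true, Bool.not_false, Bool.false_and, Bool.true_and,
      if_true, Bool.false_eq_true, if_false]
  by_cases h2 : pvSkipWords.any (fun skip => PySem.Str.isIn skip (PySem.Str.lower f)) <;>
    simp only [h2, Bool.not_true, Bool.not_false, Bool.false_and, Bool.true_and,
      if_true, Bool.false_eq_true, if_false]
  by_cases h3 : pvIsSourceCodeFile f <;>
    simp only [h3, if_true, Bool.false_eq_true, if_false]
  simp only [pvRank_eq]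
  clear h1 h2 h3
  exact pvBranches _ _ _ _ _

-- A's loop characterised by two filters over B's predicates
theorem pvA_loop (xs : List String) (s p : List String) :
    xs.foldl pvStepA (s, p) =
      (s ++ xs.filter (fun f => pvWanted f && !(pvRank f == 0)),
       p ++ xs.filter (fun f => pvWanted f && (pvRank f == 0))) := by
  induction xs generalizing s p with
  | nil => simp
  | cons x xs ih =>
    simp only [List.foldl_cons, pvStepA_eq, List.filter_cons]
    by_cases hk : pvWanted x
    · rcases pvRank_cases x with h0 | h1
      · simp [hk, h0, ih]
      · have : pvRank x ≠ 0 := by rw [h1]; decide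
        simp [hk, h1, ih]
    · simp [hk, ih]

-- inserting a rank-0 element between the rank-0 block and the rank-1 block
theorem pvInsert_mid (bef : String → String → Bool) (x : String) (P N : List String)
    (hP : ∀ y ∈ P, bef x y = false) (hN : ∀ y ∈ N, bef x y = true) :
    PySem.List.insertBy bef x (P ++ N) = P ++ x :: N := by
  induction P with
  | nil =>
    cases N with
    | nil => simp [PySem.List.insertBy]
    | cons n N' => simp [PySem.List.insertBy, hN n (by simp)]
  | cons q P' ih =>
    simp only [List.cons_append, PySem.List.insertBy, hP q (by simp), Bool.false_eq_true,
      if_false]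
    rw [ih (fun y hy => hP y (by simp [hy])) ]

-- the stable insertion-sort fold keeps rank-0 elements in front, in order
theorem pvSort_loop (xs : List String) (P N : List String)
    (hP : ∀ y ∈ P, pvRank y = 0) (hN : ∀ y ∈ N, pvRank y = 1) :
    xs.foldl (fun acc y =>
        PySem.List.insertBy (fun a b => decide (pvRank a < pvRank b)) y acc)
      (P ++ N) =
      (P ++ xs.filter (fun f => pvRank f == 0)) ++
      (N ++ xs.filter (fun f => !(pvRank f == 0))) := by
  induction xs generalizing P N with
  | nil => simp
  | cons x xs ih =>
    simp only [List.foldl_cons, List.filter_cons]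
    rcases pvRank_cases x with h0 | h1
    · rw [pvInsert_mid _ x P N
        (fun y hy => by simp [hP y hy, h0])
        (fun y hy => by simp [hN y hy, h0])]
      have := ih (P ++ [x]) N
        (fun y hy => by
          rcases List.mem_append.mp hy with h | h
          · exact hP y h
          · simp at h; subst h; exact h0) hN
      simp only [List.append_assoc, List.cons_append, List.nil_append] at this ⊢
      rw [this]
      simp [h0]
    · rw [PySem.List.insertBy_of_forall_not_before _ x (P ++ N)
        (fun y hy => by
          rcases List.mem_append.mp hy with h | h
          · simp [hP y h, h1]
          · simp [hN y h, h1])]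
      have := ih P (N ++ [x]) hP
        (fun y hy => by
          rcases List.mem_append.mp hy with h | h
          · exact hN y h
          · simp at h; subst h; exact h1)
      simp only [List.append_assoc, List.cons_append, List.nil_append] at this ⊢
      rw [this]
      simp [h1]

theorem pvSort_binary (xs : List String) :
    PySem.List.sorted xs pvRank false =
      xs.filter (fun f => pvRank f == 0) ++
      xs.filter (fun f => !(pvRank f == 0)) := by
  rw [PySem.List.sorted_eq_foldl_insertBy]
  simpa using pvSort_loop xs [] [] (by simp) (by simp)

-- ===== VERDICT (by name: the statement is the Claim_ definition above) =====
theorem find_source_files_py_spec : Claim_equal_find_source_files_py := by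
  intro all_files _
  show find_source_files_py all_files = find_source_files_py_alt all_files
  unfold find_source_files_py find_source_files_py_alt
  rw [pvA_loop, pvSort_binary]
  simp [List.filter_filter, Bool.and_comm]
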